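-- pv_equiv track=rewrite | github.com/Sibula227/TamQuanHau1 | BTCN.py | expand_andor
-- ===== SOURCE A (Python) =====
-- def is_safe_state(state, row, col):
--     """Kiểm tra xem đặt hậu tại (row,col) có xung đột với state hay không"""
--     for (r, c) in state:
--         if c == col:  # cùng cột
--             return False
--         if abs(c - col) == abs(r - row):  # cùng đường chéo
--             return False
--     return True
--
-- def expand_andor(state):
--     """Sinh các trạng thái con cho AND-OR search"""
--     children = []
--     used_rows = {r for (r, _) in state}
--     next_row = next((r for r in range(8) if r not in used_rows), None)
--     if next_row is None:
--         return []
--     for col in range(8):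
--         if is_safe_state(state, next_row, col):
--             children.append(state + [(next_row, col)])
--     return children
-- ===== SOURCE B (Python) =====
-- def expand_andor(state):
--     used_rows = set()
--     cols = set()
--     diag1 = set()
--     diag2 = set()
--     for (r, c) in state:
--         used_rows.add(r)
--         cols.add(c)
--         diag1.add(r - c)
--         diag2.add(r + c)
--     next_row = next((r for r in range(8) if r not in used_rows), None)
--     if next_row is None:
--         return []
--     return [state + [(next_row, col)] for col in range(8)
--             if col not in cols
--             and next_row - col not in diag1
--             and next_row + col not in diag2]
-- ===== Notes on version B (the rewrite author's own statement) =====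
-- stated objective: alternative
-- what changed: B builds column/diagonal occupancy sets in one pass over state and tests each candidate column with constant-time set lookups via a comprehension, instead of re-scanning the whole queen list per column through is_safe_state.
import Mathlib
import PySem

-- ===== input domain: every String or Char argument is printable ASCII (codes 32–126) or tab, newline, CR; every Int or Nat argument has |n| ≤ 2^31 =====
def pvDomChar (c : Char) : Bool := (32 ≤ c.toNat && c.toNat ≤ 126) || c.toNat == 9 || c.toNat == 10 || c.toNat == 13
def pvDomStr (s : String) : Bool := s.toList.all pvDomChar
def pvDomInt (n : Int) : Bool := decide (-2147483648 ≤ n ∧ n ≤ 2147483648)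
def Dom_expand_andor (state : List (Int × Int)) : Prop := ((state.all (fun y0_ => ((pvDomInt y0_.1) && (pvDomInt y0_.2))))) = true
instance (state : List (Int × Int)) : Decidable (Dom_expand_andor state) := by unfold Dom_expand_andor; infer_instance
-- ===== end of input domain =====

-- B replaces A's per-column rescans of the queen list (is_safe_state) by occupancy
-- sets for columns and both diagonals built in one pass, then constant-time lookups.

-- ===== PORT A =====
def is_safe_state (state : List (Int × Int)) (row col : Int) : Bool :=
  match state with
  | [] => true
  | (r, c) :: rest =>
    if c == col then false
    else if (c - col).natAbs == (r - row).natAbs then false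
    else is_safe_state rest row col

def expand_andor (state : List (Int × Int)) : List (List (Int × Int)) :=
  let used_rows : PySem.Set Int := PySem.Set.ofList (state.map Prod.fst)
  match (PySem.List.pyRange 0 8 1).find? (fun r => !(PySem.Set.contains used_rows r)) with
  | none => []
  | some next_row =>
    (PySem.List.pyRange 0 8 1).foldl
      (fun children col =>
        if is_safe_state state next_row col then children ++ [state ++ [(next_row, col)]]
        else children) []

-- ===== PORT B =====
def expand_andor_alt (state : List (Int × Int)) : List (List (Int × Int)) :=
  let idx := state.foldl
    (fun (acc : PySem.Set Int × PySem.Set Int × PySem.Set Int × PySem.Set Int) p =>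
      (PySem.Set.add acc.1 p.1, PySem.Set.add acc.2.1 p.2,
       PySem.Set.add acc.2.2.1 (p.1 - p.2), PySem.Set.add acc.2.2.2 (p.1 + p.2)))
    (PySem.Set.empty, PySem.Set.empty, PySem.Set.empty, PySem.Set.empty)
  match (PySem.List.pyRange 0 8 1).find? (fun r => !(PySem.Set.contains idx.1 r)) with
  | none => []
  | some nr =>
    ((PySem.List.pyRange 0 8 1).filter
      (fun col => !(PySem.Set.contains idx.2.1 col) &&
                  !(PySem.Set.contains idx.2.2.1 (nr - col)) &&
                  !(PySem.Set.contains idx.2.2.2 (nr + col)))).map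
      (fun col => state ++ [(nr, col)])

-- ===== PRECONDITION & SPEC =====
def Spec_expand_andor (state : List (Int × Int)) (out : List (List (Int × Int))) : Prop := out = expand_andor_alt state
instance (state : List (Int × Int)) (out : List (List (Int × Int))) : Decidable (Spec_expand_andor state out) := by unfold Spec_expand_andor; infer_instance

-- ===== CLAIM (what is proved, stated in full; the proofs are below) =====
def Claim_equal_expand_andor : Prop := ∀ (state : List (Int × Int)), Dom_expand_andor state → Spec_expand_andor state (expand_andor state)

-- ===== LEMMAS AND PROOFS =====

-- B's one-pass fold builds exactly the four sets, componentwise.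
theorem pv_foldl4_eq (state : List (Int × Int)) (a b c d : PySem.Set Int) :
    state.foldl
      (fun (acc : PySem.Set Int × PySem.Set Int × PySem.Set Int × PySem.Set Int) p =>
        (PySem.Set.add acc.1 p.1, PySem.Set.add acc.2.1 p.2,
         PySem.Set.add acc.2.2.1 (p.1 - p.2), PySem.Set.add acc.2.2.2 (p.1 + p.2)))
      (a, b, c, d)
    = (PySem.Set.update a (state.map Prod.fst),
       PySem.Set.update b (state.map Prod.snd),
       PySem.Set.update c (state.map (fun p => p.1 - p.2)),
       PySem.Set.update d (state.map (fun p => p.1 + p.2))) := by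
  induction state generalizing a b c d with
  | nil => simp [PySem.Set.update]
  | cons p rest ih => simp [List.foldl_cons, PySem.Set.update_cons, ih]

-- Characterisation of A's safety scan as three non-membership conditions.
theorem pv_safe_iff (state : List (Int × Int)) (row col : Int) :
    is_safe_state state row col = true ↔
      (∀ p ∈ state, p.2 ≠ col ∧ p.1 - p.2 ≠ row - col ∧ p.1 + p.2 ≠ row + col) := by
  induction state with
  | nil => simp [is_safe_state]
  | cons p rest ih =>
    obtain ⟨r, c⟩ := p
    by_cases h1 : c = col
    · simp [is_safe_state, h1]
    · by_cases h2 : (c - col).natAbs = (r - row).natAbs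
      · simp only [is_safe_state, beq_iff_eq, h1, if_false, h2, if_true, List.forall_mem_cons]
        constructor
        · intro h; cases h
        · rintro ⟨⟨_, hd1, hd2⟩, _⟩; omega
      · simp only [is_safe_state, beq_iff_eq, h1, if_false, h2, if_false, ih,
          List.forall_mem_cons]
        constructor
        · intro h; exact ⟨⟨h1, by omega, by omega⟩, h⟩
        · rintro ⟨_, h⟩; exact h

-- A's per-column test equals B's three set lookups.
theorem pv_contains_false (s : PySem.Set Int) (x : Int) :
    PySem.Set.contains s x = false ↔ x ∉ s := by
  rw [← PySem.Set.contains_iff]; cases PySem.Set.contains s x <;> simp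

-- A's per-column test equals B's three set lookups.
theorem pv_safe_eq_sets (state : List (Int × Int)) (row col : Int) :
    is_safe_state state row col =
      (!(PySem.Set.contains (PySem.Set.ofList (state.map Prod.snd)) col) &&
       !(PySem.Set.contains (PySem.Set.ofList (state.map (fun p => p.1 - p.2))) (row - col)) &&
       !(PySem.Set.contains (PySem.Set.ofList (state.map (fun p => p.1 + p.2))) (row + col))) := by
  rw [Bool.eq_iff_iff, pv_safe_iff]
  simp only [Bool.and_eq_true, Bool.not_eq_true', pv_contains_false, PySem.Set.mem_ofList,
    List.mem_map, not_exists, not_and]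
  constructor
  · intro h
    exact ⟨⟨fun p hp => (h p hp).1, fun p hp => (h p hp).2.1⟩, fun p hp => (h p hp).2.2⟩
  · rintro ⟨⟨h1, h2⟩, h3⟩ p hp
    exact ⟨h1 p hp, h2 p hp, h3 p hp⟩

theorem pv_update_empty (xs : List Int) : PySem.Set.update PySem.Set.empty xs = PySem.Set.ofList xs := rfl

-- ===== VERDICT (by name: the statement is the Claim_ definition above) =====
theorem expand_andor_spec : Claim_equal_expand_andor := by
  intro state _
  unfold Spec_expand_andor expand_andor expand_andor_alt
  rw [pv_foldl4_eq]
  simp only [pv_update_empty]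
  cases h : (PySem.List.pyRange 0 8 1).find?
      (fun r => !(PySem.Set.contains (PySem.Set.ofList (state.map Prod.fst)) r)) with
  | none => rfl
  | some nr =>
    dsimp only
    rw [PySem.List.foldl_append_if (fun col => is_safe_state state nr col)
      (fun col => state ++ [(nr, col)])]
    simp only [List.nil_append]
    congr 1
    apply List.filter_congr
    intro col _
    rw [pv_safe_eq_sets]
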